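-- pv_equiv track=rewrite | github.com/Chasonnnn/agi | projects/contextshift-deid/src/contextshift_deid/annotation.py | find_subsequence
-- ===== SOURCE A (Python) =====
-- from typing import Sequence
--
-- def normalize_whitespace(text: str) -> str:
--     return " ".join(text.split())
--
-- def normalize_token(token: str) -> str:
--     return normalize_whitespace(token).casefold()
--
-- def find_subsequence(tokens: Sequence[str], target_tokens: Sequence[str]) -> tuple[int, int] | None:
--     normalized_tokens = [normalize_token(token) for token in tokens]
--     normalized_target = [normalize_token(token) for token in target_tokens if normalize_token(token)]
--     if not normalized_target:
--         return None
--     window = len(normalized_target)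
--     for start in range(0, len(normalized_tokens) - window + 1):
--         if normalized_tokens[start : start + window] == normalized_target:
--             return (start, start + window)
--     return None
-- ===== SOURCE B (Python) =====
-- def find_subsequence(tokens, target_tokens):
--     norm = [" ".join(t.split()).casefold() for t in tokens]
--     tgt = [s for s in (" ".join(t.split()).casefold() for t in target_tokens) if s]
--     if not tgt:
--         return None
--     m = len(tgt)
--     cands = list(range(len(norm) - m + 1))
--     for j, t in enumerate(tgt):
--         cands = [i for i in cands if norm[i + j] == t]
--         if not cands:
--             return None
--     s = cands[0]
--     return (s, s + m)
-- ===== Notes on version B (the rewrite author's own statement) =====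
-- stated objective: alternative
-- what changed: B searches pattern-major: it keeps a shrinking set of candidate start positions and makes one filtering pass per target token (comparing only column j), instead of A's text-major sliding window that slices and compares the whole target at every start index.
import Mathlib
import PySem

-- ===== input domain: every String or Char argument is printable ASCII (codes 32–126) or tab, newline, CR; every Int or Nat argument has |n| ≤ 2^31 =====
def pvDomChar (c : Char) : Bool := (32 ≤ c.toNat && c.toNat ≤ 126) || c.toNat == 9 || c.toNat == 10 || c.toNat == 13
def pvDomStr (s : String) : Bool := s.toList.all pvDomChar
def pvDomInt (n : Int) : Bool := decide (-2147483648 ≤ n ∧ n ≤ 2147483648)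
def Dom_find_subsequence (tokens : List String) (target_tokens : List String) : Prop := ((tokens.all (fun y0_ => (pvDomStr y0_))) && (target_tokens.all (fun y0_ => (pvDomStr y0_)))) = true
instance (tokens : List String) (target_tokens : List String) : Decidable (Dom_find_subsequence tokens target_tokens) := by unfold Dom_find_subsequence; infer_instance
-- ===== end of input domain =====

-- B searches pattern-major: one filtering pass per target token over a shrinking candidate-start set, instead of A's sliding-window slice comparison; same return value (alternative algorithm, no speed claim).

-- ===== PORT A =====
def normalize_whitespace (text : String) : String :=
  PySem.Str.join " " (PySem.Str.split₀ text)

-- .casefold() is ported as lower: exact on the printable-ASCII + tab/newline/CR domain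
def normalize_token (token : String) : String :=
  PySem.Str.lower (normalize_whitespace token)

def find_subsequence (tokens : List String) (target_tokens : List String) : Option (Int × Int) :=
  let normalized_tokens := tokens.map normalize_token
  let normalized_target := (target_tokens.filter (fun t => normalize_token t ≠ "")).map normalize_token
  if normalized_target = [] then none
  else
    let window : Int := normalized_target.length
    match (PySem.List.pyRange 0 ((normalized_tokens.length : Int) - window + 1) 1).find?
        (fun start => decide (PySem.List.slice normalized_tokens (some start) (some (start + window)) = normalized_target)) with
    | some start => some (start, start + window)
    | none => none

-- ===== PORT B =====
def pvNorm (t : String) : String :=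
  PySem.Str.lower (PySem.Str.join " " (PySem.Str.split₀ t))

-- the 'for j, t in enumerate(tgt)' loop of Source B, with its early 'return None';
-- norm[i + j] is always in range here, so pyGetD is exact for Python's norm[i + j]
def pvFilterLoop (norm : List String) (cands : List Int) : List (Int × String) → Option (List Int)
  | [] => some cands
  | (j, t) :: rest =>
    let c' := cands.filter (fun i => decide (PySem.List.pyGetD norm (i + j) "" = t))
    if c' = [] then none else pvFilterLoop norm c' rest

def find_subsequence_alt (tokens : List String) (target_tokens : List String) : Option (Int × Int) :=
  let norm := tokens.map pvNorm
  let tgt := (target_tokens.map pvNorm).filter (fun s => s ≠ "")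
  if tgt = [] then none
  else
    let m : Int := tgt.length
    match pvFilterLoop norm (PySem.List.pyRange 0 ((norm.length : Int) - m + 1) 1) (PySem.List.enumerate tgt 0) with
    | none => none
    | some cands =>
      match cands.head? with        -- cands[0]; the loop only returns a nonempty list
      | some s => some (s, s + m)
      | none => none

-- ===== PRECONDITION & SPEC =====
def Spec_find_subsequence (tokens : List String) (target_tokens : List String) (out : Option (Int × Int)) : Prop := out = find_subsequence_alt tokens target_tokens
instance (tokens : List String) (target_tokens : List String) (out : Option (Int × Int)) : Decidable (Spec_find_subsequence tokens target_tokens out) := by unfold Spec_find_subsequence; infer_instance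

-- ===== CLAIM (what is proved, stated in full; the proofs are below) =====
def Claim_equal_find_subsequence : Prop := ∀ (tokens : List String) (target_tokens : List String), Dom_find_subsequence tokens target_tokens → Spec_find_subsequence tokens target_tokens (find_subsequence tokens target_tokens)

-- ===== LEMMAS AND PROOFS =====

theorem pv_filter_map {A B : Type} (f : A -> B) (p : B -> Bool) (l : List A) :
    (l.map f).filter p = (l.filter (fun x => p (f x))).map f := by
  induction l with
  | nil => rfl
  | cons a t ih => cases h : p (f a) <;> simp [h, ih]

-- the staged filters of pvFilterLoop amount to one filter by the conjunction of all column tests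
theorem pv_filterLoop_eq (norm : List String) :
    ∀ (l : List (Int × String)) (cands : List Int),
      pvFilterLoop norm cands l =
        (if l ≠ [] ∧ cands.filter (fun i => l.all (fun p => decide (PySem.List.pyGetD norm (i + p.1) "" = p.2))) = [] then none
         else some (cands.filter (fun i => l.all (fun p => decide (PySem.List.pyGetD norm (i + p.1) "" = p.2))))) := by
  intro l
  induction l with
  | nil => intro cands; simp [pvFilterLoop]
  | cons p rest ih =>
    intro cands
    obtain ⟨j, t⟩ := p
    simp only [pvFilterLoop]
    set c' := cands.filter (fun i => decide (PySem.List.pyGetD norm (i + j) "" = t)) with hc'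
    have hf : cands.filter (fun i => ((j, t) :: rest).all
        (fun p => decide (PySem.List.pyGetD norm (i + p.1) "" = p.2)))
        = c'.filter (fun i => rest.all (fun p => decide (PySem.List.pyGetD norm (i + p.1) "" = p.2))) := by
      rw [hc', List.filter_filter]
      refine List.filter_congr ?_
      intro x _
      cases hA : decide (PySem.List.pyGetD norm (x + j) "" = t) <;>
        cases hB : rest.all (fun p => decide (PySem.List.pyGetD norm (x + p.1) "" = p.2)) <;>
        simp [List.all_cons, hA, hB]
    rw [hf]
    by_cases h0 : c' = []
    · rw [if_pos h0]
      simp [h0]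
    · rw [if_neg h0, ih c']
      by_cases hF : c'.filter (fun i => rest.all (fun p => decide (PySem.List.pyGetD norm (i + p.1) "" = p.2))) = []
      · by_cases hr : rest = []
        · exfalso; apply h0; rw [hr] at hF; simpa using hF
        · simp [hF, hr]
      · simp [hF]

-- the column tests at a start k within bounds say exactly that the window equals tgt
theorem pv_allE (tgt : List String) :
    ∀ (norm : List String) (i b : Int) (o : Nat), i + b = (o : Int) → o + tgt.length ≤ norm.length →
      (PySem.List.enumerate tgt b).all (fun p => decide (PySem.List.pyGetD norm (i + p.1) "" = p.2))
        = decide ((norm.drop o).take tgt.length = tgt) := by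
  induction tgt with
  | nil => intro norm i b o _ _; simp
  | cons t rest ih =>
    intro norm i b o ho hle
    have hlt : o < norm.length := by simp at hle; omega
    have hdrop : norm.drop o = norm[o] :: norm.drop (o + 1) := List.drop_eq_getElem_cons hlt
    rw [PySem.List.enumerate_cons, List.all_cons]
    have hget : PySem.List.pyGetD norm (i + b) "" = norm[o] := by
      rw [ho, PySem.List.pyGetD_natCast]
      simp [List.getD_eq_getElem?_getD, hlt]
    rw [hget, ih norm i (b + 1) (o + 1) (by omega) (by simp at hle ⊢; omega)]
    rw [hdrop]
    simp only [List.length_cons, List.take_succ_cons, List.cons.injEq]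
    by_cases h1 : norm[o] = t <;> by_cases h2 : (norm.drop (o+1)).take rest.length = rest <;>
      simp [h1, h2]

theorem pv_filter_congr {A : Type} (p q : A → Bool) (l : List A)
    (h : ∀ x ∈ l, p x = q x) : l.filter p = l.filter q :=
  List.filter_congr h

theorem find_subsequence_main (tokens target_tokens : List String) :
    find_subsequence tokens target_tokens = find_subsequence_alt tokens target_tokens := by
  simp only [find_subsequence, find_subsequence_alt]
  have hfn : pvNorm = normalize_token := rfl
  rw [hfn]
  rw [pv_filter_map normalize_token (fun s => decide (s ≠ "")) target_tokens]
  set norm := tokens.map normalize_token with hnorm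
  set tgt := (target_tokens.filter (fun t => decide (normalize_token t ≠ ""))).map normalize_token
    with hT
  by_cases htgt : tgt = []
  · simp [htgt]
  · rw [if_neg htgt, if_neg htgt]
    set m : Int := (tgt.length : Int) with hm
    set cands0 := PySem.List.pyRange 0 ((norm.length : Int) - m + 1) 1 with hc0
    rw [pv_filterLoop_eq]
    -- on cands0, the slice test and the all-columns test agree
    have hcongr : cands0.filter
        (fun i => (PySem.List.enumerate tgt 0).all
          (fun p => decide (PySem.List.pyGetD norm (i + p.1) "" = p.2)))
        = cands0.filter
          (fun s => decide (PySem.List.slice norm (some s) (some (s + m)) = tgt)) := by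
      refine pv_filter_congr _ _ _ ?_
      intro i hi
      have hb := PySem.List.mem_pyRange_one.mp hi
      obtain ⟨k, rfl⟩ : ∃ k : Nat, i = (k : Int) := ⟨i.toNat, (Int.toNat_of_nonneg hb.1).symm⟩
      have hkm : k + tgt.length ≤ norm.length := by
        have := hb.2; rw [hm] at this; omega
      rw [pv_allE tgt norm (k : Int) 0 k (by omega) hkm]
      rw [hm, PySem.List.slice_natCast_add norm k tgt.length]
    rw [hcongr]
    set f := cands0.filter
        (fun s => decide (PySem.List.slice norm (some s) (some (s + m)) = tgt)) with hfdef
    rw [← List.head?_filter, ← hfdef]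
    have henum : PySem.List.enumerate tgt 0 ≠ [] := by
      cases h : tgt with
      | nil => exact absurd h htgt
      | cons a l => simp [PySem.List.enumerate_cons]
    by_cases hf : f = []
    · rw [hf, if_pos ⟨henum, rfl⟩]
      rfl
    · rw [if_neg (fun h => hf h.2)]

-- ===== VERDICT (by name: the statement is the Claim_ definition above) =====
theorem find_subsequence_spec : Claim_equal_find_subsequence := by
  intro tokens target_tokens _
  unfold Spec_find_subsequence
  exact find_subsequence_main tokens target_tokens
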